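-- pv_equiv track=rewrite | github.com/peterflowset/MyMedia-scraper | enrichment/contact_enricher.py | _combine_pages
-- ===== SOURCE A (Python) =====
-- MAX_TEXT_PER_REQUEST = 15_000
--
-- def _combine_pages(pages: dict[str, str]) -> str:
--     parts = []
--     total_len = 0
--     for page_name, text in pages.items():
--         remaining = MAX_TEXT_PER_REQUEST - total_len
--         if remaining <= 0:
--             break
--         chunk = text[:remaining]
--         parts.append(f"--- Seite: {page_name} ---\n{chunk}")
--         total_len += len(chunk)
--     return "\n\n".join(parts)
-- ===== SOURCE B (Python) =====
-- from itertools import accumulate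
--
-- MAX_TEXT_PER_REQUEST = 15_000
--
-- def _combine_pages(pages: dict[str, str]) -> str:
--     items = list(pages.items())
--     prefixes = [0] + list(accumulate(len(text) for _, text in items))
--     return "\n\n".join(
--         f"--- Seite: {name} ---\n{text[:MAX_TEXT_PER_REQUEST - prev]}"
--         for (name, text), prev in zip(items, prefixes)
--         if prev < MAX_TEXT_PER_REQUEST
--     )
-- ===== Notes on version B (the rewrite author's own statement) =====
-- stated objective: alternative
-- what changed: Replaces A's stateful loop (running total of emitted chunk lengths with an early break) by two separated passes: precomputed prefix sums of raw text lengths, then one zip/filter comprehension that keeps a page iff its preceding prefix sum is below the budget and slices it to the remaining budget.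
import Mathlib
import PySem

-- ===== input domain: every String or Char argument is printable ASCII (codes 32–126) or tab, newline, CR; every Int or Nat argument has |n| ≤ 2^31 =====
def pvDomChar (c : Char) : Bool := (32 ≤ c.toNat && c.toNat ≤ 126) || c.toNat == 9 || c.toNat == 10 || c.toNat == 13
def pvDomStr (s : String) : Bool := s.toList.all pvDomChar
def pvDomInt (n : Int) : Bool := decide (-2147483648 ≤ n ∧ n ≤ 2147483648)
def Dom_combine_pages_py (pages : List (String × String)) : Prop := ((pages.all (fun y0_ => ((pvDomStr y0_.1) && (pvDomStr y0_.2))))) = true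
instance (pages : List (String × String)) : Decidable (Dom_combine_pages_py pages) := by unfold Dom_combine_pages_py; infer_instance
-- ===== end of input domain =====

-- B separates the budget arithmetic (prefix sums of raw text lengths) from the string
-- assembly (one zip/filter pass), replacing A's running total and early break; alternative
-- decomposition, same cost.

-- ===== PORT A =====
-- A's loop: parts accumulator + running total of emitted chunk lengths, break when budget spent.
def combineAAux : Int → List (String × String) → List String
  | _, [] => []
  | total_len, (page_name, text) :: rest =>
    let remaining : Int := 15000 - total_len
    if remaining ≤ 0 then []
    else
      let chunk := PySem.Str.slice text none (some remaining)
      ("--- Seite: " ++ page_name ++ " ---\n" ++ chunk)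
        :: combineAAux (total_len + PySem.Str.len chunk) rest

def combine_pages_py (pages : List (String × String)) : String :=
  PySem.Str.join "\n\n" (combineAAux 0 pages)

-- ===== PORT B =====
-- B: prefix sums of raw lengths (scanl, prefix before each page), then zip + filtered map.
def combine_pages_py_alt (pages : List (String × String)) : String :=
  let prefixes := List.scanl (· + ·) (0 : Int) (pages.map fun it => PySem.Str.len it.2)
  PySem.Str.join "\n\n"
    ((pages.zip prefixes).filterMap fun x =>
      if x.2 < 15000 then
        some ("--- Seite: " ++ x.1.1 ++ " ---\n"
              ++ PySem.Str.slice x.1.2 none (some (15000 - x.2)))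
      else none)

-- ===== PRECONDITION & SPEC =====
def Spec_combine_pages_py (pages : List (String × String)) (out : String) : Prop := out = combine_pages_py_alt pages
instance (pages : List (String × String)) (out : String) : Decidable (Spec_combine_pages_py pages out) := by unfold Spec_combine_pages_py; infer_instance

-- ===== CLAIM (what is proved, stated in full; the proofs are below) =====
def Claim_equal_combine_pages_py : Prop := ∀ (pages : List (String × String)), Dom_combine_pages_py pages → Spec_combine_pages_py pages (combine_pages_py pages)

-- ===== LEMMAS AND PROOFS =====

theorem pv_len_nonneg (s : String) : 0 ≤ PySem.Str.len s := by
  simp [PySem.Str.len_eq]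

theorem pv_len_slice_to (s : String) (b : Int) (hb : 0 ≤ b) :
    PySem.Str.len (PySem.Str.slice s none (some b)) = min (PySem.Str.len s) b := by
  simp [PySem.Str.len_eq, PySem.Str.toList_slice, PySem.List.slice_to _ hb]
  omega

-- once the budget is spent, B keeps nothing of the remaining pages
theorem pv_tail_nil (rest : List (String × String)) (p : Int) (hp : 15000 ≤ p) :
    (rest.zip (List.scanl (· + ·) p (rest.map fun it => PySem.Str.len it.2))).filterMap
      (fun x =>
        if x.2 < 15000 then
          some ("--- Seite: " ++ x.1.1 ++ " ---\n"
                ++ PySem.Str.slice x.1.2 none (some (15000 - x.2)))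
        else none) = [] := by
  induction rest generalizing p with
  | nil => simp
  | cons hd tl ih =>
    have hlen := pv_len_nonneg hd.2
    simp only [List.map_cons, List.scanl_cons, List.zip_cons_cons, List.filterMap_cons]
    rw [if_neg (by omega)]
    exact ih (p + PySem.Str.len hd.2) (by omega)

-- A's running total is min (raw prefix) 15000; the two passes produce the same parts
theorem pv_main (pages : List (String × String)) (p : Int) (hp : 0 ≤ p) :
    combineAAux (min p 15000) pages =
    (pages.zip (List.scanl (· + ·) p (pages.map fun it => PySem.Str.len it.2))).filterMap
      (fun x =>
        if x.2 < 15000 then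
          some ("--- Seite: " ++ x.1.1 ++ " ---\n"
                ++ PySem.Str.slice x.1.2 none (some (15000 - x.2)))
        else none) := by
  induction pages generalizing p with
  | nil => simp [combineAAux]
  | cons hd tl ih =>
    obtain ⟨name, text⟩ := hd
    have hlen := pv_len_nonneg text
    simp only [List.map_cons, List.scanl_cons, List.zip_cons_cons, List.filterMap_cons]
    by_cases h : p < 15000
    · rw [if_pos h]
      have hmin : min p 15000 = p := by omega
      simp only [combineAAux, hmin]
      rw [if_neg (by omega : ¬ (15000 - p ≤ 0))]
      have hchunk := pv_len_slice_to text (15000 - p) (by omega)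
      have htot : p + PySem.Str.len (PySem.Str.slice text none (some (15000 - p)))
          = min (p + PySem.Str.len text) 15000 := by
        have := pv_len_nonneg text
        omega
      rw [List.cons.injEq]
      exact ⟨rfl, by rw [htot]; exact ih (p + PySem.Str.len text) (by omega)⟩
    · rw [if_neg h]
      have hmin : min p 15000 = 15000 := by omega
      simp only [combineAAux, hmin]
      rw [if_pos (by omega : (15000 : Int) - 15000 ≤ 0)]
      exact (pv_tail_nil tl (p + PySem.Str.len text) (by omega)).symm

-- ===== VERDICT (by name: the statement is the Claim_ definition above) =====
theorem combine_pages_py_spec : Claim_equal_combine_pages_py := by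
  intro pages _
  show combine_pages_py pages = combine_pages_py_alt pages
  unfold combine_pages_py combine_pages_py_alt
  have := pv_main pages 0 le_rfl
  simp only [show min (0 : Int) 15000 = 0 by omega] at this
  rw [this]
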